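-- pv_equiv track=rewrite | github.com/kevindevine16/CodiltyAlpha | SolutionToAlpha.py | solution
-- ===== SOURCE A (Python) =====
-- def solution(A):
--     counter = 0
--     i = 0
--     B = list(dict.fromkeys(A))
--     while B[-1]-A[i] != 0:
--         counter +=1
--         i += 1
--     return counter
-- ===== SOURCE B (Python) =====
-- def solution(A):
--     seen = set()
--     last = 0
--     for i, x in enumerate(A):
--         if x not in seen:
--             seen.add(x)
--             last = i
--     return last
-- ===== Notes on version B (the rewrite author's own statement) =====
-- stated objective: simpler
-- what changed: Instead of building the ordered-unique list with dict.fromkeys and then re-scanning A for its last element, B does one left-to-right pass with a seen-set and keeps the index of the most recently encountered new value.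
import Mathlib
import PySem

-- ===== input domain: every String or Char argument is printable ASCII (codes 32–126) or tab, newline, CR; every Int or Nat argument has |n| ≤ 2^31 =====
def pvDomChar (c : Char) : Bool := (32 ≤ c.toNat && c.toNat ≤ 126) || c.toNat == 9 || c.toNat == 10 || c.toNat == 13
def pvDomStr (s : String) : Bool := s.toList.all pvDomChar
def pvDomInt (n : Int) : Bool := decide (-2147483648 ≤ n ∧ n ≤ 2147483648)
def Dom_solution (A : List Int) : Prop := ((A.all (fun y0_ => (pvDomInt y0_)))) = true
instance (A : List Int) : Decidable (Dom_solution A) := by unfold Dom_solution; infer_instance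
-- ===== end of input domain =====

-- B replaces A's dedup-list + second scan by a single pass with a seen-set (objective: simpler).

-- ===== PORT A =====
-- the while loop; counter = i throughout, fuel = A.length suffices because the
-- target is an element of A (for empty A the IndexError is excluded by Pre_)
def solLoopA (A : List Int) (t : Int) (i : Nat) : Nat → Int
  | 0 => 0
  | fuel + 1 =>
    match PySem.List.pyGet? A (Int.ofNat i) with
    | none => 0
    | some a => if t - a ≠ 0 then 1 + solLoopA A t (i + 1) fuel else 0

def solution (A : List Int) : Int :=
  match PySem.List.pyGet? (PySem.List.dedup A) (-1) with
  | none => 0        -- B[-1] raises IndexError here; excluded by Pre_solution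
  | some t => solLoopA A t 0 A.length

-- ===== PORT B =====
def solution_alt (A : List Int) : Int :=
  ((PySem.List.enumerate A 0).foldl
    (fun (st : PySem.Set Int × Int) p =>
      if PySem.Set.contains st.1 p.2 then st
      else (PySem.Set.add st.1 p.2, p.1))
    (PySem.Set.empty, 0)).2

-- ===== PRECONDITION & SPEC =====
-- Pre_ excludes only the empty list, on which A raises IndexError (B[-1]).
def Pre_solution (A : List Int) : Prop := A ≠ []
instance (A : List Int) : Decidable (Pre_solution A) := by unfold Pre_solution; infer_instance
def pvWitness_solution : List Int := [3, 1, 3, 2]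

def Spec_solution (A : List Int) (out : Int) : Prop := out = solution_alt A
instance (A : List Int) (out : Int) : Decidable (Spec_solution A out) := by unfold Spec_solution; infer_instance

-- ===== CLAIM (what is proved, stated in full; the proofs are below) =====
def Claim_equal_solution : Prop := ∀ (A : List Int), Dom_solution A → Pre_solution A → Spec_solution A (solution A)

-- ===== LEMMAS AND PROOFS =====

theorem contains_iff_mem {x : Int} {s : PySem.Set Int} :
    PySem.Set.contains s x = true ↔ x ∈ s := by
  simp [PySem.Set.contains]

theorem foldl_add_empty (l : List Int) :
    l.foldl PySem.Set.add PySem.Set.empty = PySem.List.dedup l := by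
  rw [PySem.List.dedup_eq_ofList, PySem.Set.ofList_eq_foldl]; rfl

-- the seen-set of B's fold is A's dedup of the traversed prefix, whatever the index payload
theorem altFold_fst (l : List Int) : ∀ (s : Int) (s0 : PySem.Set Int) (c : Int),
    ((PySem.List.enumerate l s).foldl
      (fun (st : PySem.Set Int × Int) p =>
        if PySem.Set.contains st.1 p.2 then st
        else (PySem.Set.add st.1 p.2, p.1)) (s0, c)).1 = l.foldl PySem.Set.add s0 := by
  induction l with
  | nil => intro s s0 c; simp [PySem.List.enumerate_nil]
  | cons x xs ih =>
    intro s s0 c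
    simp only [PySem.List.enumerate_cons, List.foldl_cons]
    by_cases h : PySem.Set.contains s0 x = true
    · rw [show (if PySem.Set.contains s0 x = true then (s0, c)
            else (PySem.Set.add s0 x, s)) = (s0, c) from if_pos h, ih]
      have ha : PySem.Set.add s0 x = s0 := by
        simp only [PySem.Set.add]; rw [if_pos h]
      rw [ha]
    · rw [show (if PySem.Set.contains s0 x = true then (s0, c)
            else (PySem.Set.add s0 x, s)) = (PySem.Set.add s0 x, s) from if_neg h, ih]

-- B's fold over a snoc
theorem altFold_snoc (l : List Int) (x : Int) :
    solution_alt (l ++ [x])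
      = if x ∈ l then solution_alt l else (l.length : Int) := by
  unfold solution_alt
  rw [PySem.List.enumerate_append, List.foldl_append,
    PySem.List.enumerate_cons, PySem.List.enumerate_nil, List.foldl_cons, List.foldl_nil]
  have h1 : ((PySem.List.enumerate l 0).foldl
      (fun (st : PySem.Set Int × Int) p =>
        if PySem.Set.contains st.1 p.2 then st
        else (PySem.Set.add st.1 p.2, p.1)) (PySem.Set.empty, 0)).1
      = PySem.List.dedup l := by
    rw [altFold_fst, foldl_add_empty]
  by_cases hx : x ∈ l
  · have hb : PySem.Set.contains (((PySem.List.enumerate l 0).foldl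
        (fun (st : PySem.Set Int × Int) p =>
          if PySem.Set.contains st.1 p.2 then st
          else (PySem.Set.add st.1 p.2, p.1)) (PySem.Set.empty, 0)).1) x = true := by
      rw [h1]; exact contains_iff_mem.mpr ((PySem.List.mem_dedup _ _).mpr hx)
    rw [if_pos hb, if_pos hx]
  · have hb : ¬ PySem.Set.contains (((PySem.List.enumerate l 0).foldl
        (fun (st : PySem.Set Int × Int) p =>
          if PySem.Set.contains st.1 p.2 then st
          else (PySem.Set.add st.1 p.2, p.1)) (PySem.Set.empty, 0)).1) x = true := by
      rw [h1]
      exact fun hb => hx ((PySem.List.mem_dedup _ _).mp (contains_iff_mem.mp hb))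
    rw [if_neg hb, if_neg hx]
    simp

-- the while loop returns the first-occurrence index (relative scan from i)
theorem solLoopA_eq (A : List Int) (t : Int) : ∀ (fuel i : Nat),
    A.length ≤ i + fuel → ∀ k, PySem.List.index? (A.drop i) t = some k →
    solLoopA A t i fuel = (k : Int) := by
  intro fuel
  induction fuel with
  | zero =>
    intro i hle k hk
    have : A.drop i = [] := List.drop_eq_nil_of_le (by omega)
    rw [this] at hk
    simp [PySem.List.index?_eq_idxOf?] at hk
  | succ f ih =>
    intro i hle k hk
    have hmem : t ∈ A.drop i := by
      have := PySem.List.index?_isSome_iff (xs := A.drop i) (v := t)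
      rw [hk] at this; simpa using this.mp rfl
    have hi : i < A.length := by
      by_contra h
      have : A.drop i = [] := List.drop_eq_nil_of_le (by omega)
      rw [this] at hmem; simp at hmem
    have hdrop : A.drop i = A[i] :: A.drop (i + 1) := List.drop_eq_getElem_cons hi
    have hget : PySem.List.pyGet? A (Int.ofNat i) = some A[i] := by
      simp only [Int.ofNat_eq_natCast, PySem.List.pyGet?_natCast]
      exact List.getElem?_eq_getElem hi
    have hred : solLoopA A t i (f + 1)
        = if t - A[i] ≠ 0 then 1 + solLoopA A t (i + 1) f else 0 := by
      rw [solLoopA, hget]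
    rw [hred]
    by_cases heq : t = A[i]
    · have : ¬ (t - A[i] ≠ 0) := by omega
      rw [if_neg this]
      rw [hdrop, ← heq, PySem.List.index?_cons_self] at hk
      simp at hk; omega
    · have hne : t - A[i] ≠ 0 := by omega
      rw [hdrop, PySem.List.index?_cons_of_ne _ (Ne.symm heq)] at hk
      rw [if_pos hne]
      match hk' : PySem.List.index? (A.drop (i + 1)) t with
      | none => rw [hk'] at hk; simp at hk
      | some k' =>
        rw [hk'] at hk; simp at hk
        rw [ih (i + 1) (by omega) k' hk']
        omega

-- dedup over a snoc
theorem dedup_snoc (l : List Int) (x : Int) :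
    PySem.List.dedup (l ++ [x]) =
      if x ∈ l then PySem.List.dedup l else PySem.List.dedup l ++ [x] := by
  have : PySem.List.dedup (l ++ [x]) = PySem.Set.add (PySem.List.dedup l) x := by
    rw [← foldl_add_empty, ← foldl_add_empty, List.foldl_append, List.foldl_cons, List.foldl_nil]
  rw [this]
  by_cases h : x ∈ l
  · rw [if_pos h]
    simp only [PySem.Set.add]
    rw [show PySem.Set.contains (PySem.List.dedup l) x = true from
      contains_iff_mem.mpr ((PySem.List.mem_dedup _ _).mpr h)]
    rfl
  · rw [if_neg h]
    simp only [PySem.Set.add]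
    rw [show PySem.Set.contains (PySem.List.dedup l) x = false from by
      rw [← Bool.not_eq_true]
      exact fun hb => h ((PySem.List.mem_dedup _ _).mp (contains_iff_mem.mp hb))]
    rfl

-- core: B's answer is the first-occurrence index of the last element of dedup
theorem core (A : List Int) (t : Int)
    (h : (PySem.List.dedup A).getLast? = some t) :
    ∃ k : Nat, PySem.List.index? A t = some k ∧ solution_alt A = (k : Int) := by
  induction A using List.reverseRecOn with
  | nil => simp [PySem.List.dedup] at h
  | append_singleton l x ih =>
    rw [dedup_snoc] at h
    by_cases hx : x ∈ l
    · rw [if_pos hx] at h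
      obtain ⟨k, hk1, hk2⟩ := ih h
      have ht : t ∈ l :=
        (PySem.List.mem_dedup _ _).mp (List.mem_of_getLast? h)
      exact ⟨k, by rw [PySem.List.index?_append_of_mem _ ht]; exact hk1,
        by rw [altFold_snoc, if_pos hx]; exact hk2⟩
    · rw [if_neg hx] at h
      have ht : t = x := by
        have := List.getLast?_concat (l := PySem.List.dedup l) (a := x)
        rw [this] at h; exact (Option.some_inj.mp h).symm
      subst ht
      exact ⟨l.length, PySem.List.index?_append_singleton_self _ _ hx,
        by rw [altFold_snoc, if_neg hx]⟩

-- ===== VERDICT (by name: the statement is the Claim_ definition above) =====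
theorem solution_spec : Claim_equal_solution := by
  intro A _dom hpre
  unfold Spec_solution solution
  have hne : PySem.List.dedup A ≠ [] := by
    obtain ⟨a, as, rfl⟩ := List.exists_cons_of_ne_nil hpre
    intro h
    have ha : a ∈ PySem.List.dedup (a :: as) :=
      (PySem.List.mem_dedup _ _).mpr (List.mem_cons_self)
    rw [h] at ha; simp at ha
  obtain ⟨t, ht⟩ := Option.ne_none_iff_exists'.mp
    (fun h => hne (List.getLast?_eq_none_iff.mp h))
  rw [PySem.List.pyGet?_neg_one, ht]
  obtain ⟨k, hk1, hk2⟩ := core A t ht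
  rw [hk2]
  exact solLoopA_eq A t A.length 0 (by omega) k (by simpa using hk1)
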